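-- pv_equiv track=rewrite | github.com/Yassellee/Tsingenda-backend | extractor/extractor.py | get_continuous_list
-- ===== SOURCE A (Python) =====
-- from typing import Mapping, Tuple, Union, List
--
-- def get_continuous_list(entity_list: List[Tuple[Union[str, int]]]):
--     if not entity_list:
--         return []
--
--     res_list = []
--     p_word, _, _, p_ed = entity_list[0]
--     for idx in range(1, len(entity_list)):
--         c_word, _, c_st, c_ed = entity_list[idx]
--         if c_st == p_ed:
--             p_word += c_word
--         else:
--             res_list.append(p_word)
--             p_word = c_word
--
--         p_ed = c_ed
--
--     res_list.append(p_word)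
--
--     return res_list
-- ===== SOURCE B (Python) =====
-- def get_continuous_list(entity_list):
--     # Two staged passes: (1) find run boundaries, (2) slice-and-join each segment.
--     n = len(entity_list)
--     if n == 0:
--         return []
--     bounds = [0] + [i for i, (prev, cur) in enumerate(zip(entity_list, entity_list[1:]), 1)
--                     if cur[2] != prev[3]] + [n]
--     return [''.join(e[0] for e in entity_list[s:t]) for s, t in zip(bounds, bounds[1:])]
-- ===== Notes on version B (the rewrite author's own statement) =====
-- stated objective: alternative
-- what changed: A merges in one stateful pass, growing an accumulator string and flushing it at each boundary; B is two staged passes: first it computes the list of run-boundary indices from zipped consecutive pairs, then it slices each (start,end) segment out of the list and joins its words.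
import Mathlib
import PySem

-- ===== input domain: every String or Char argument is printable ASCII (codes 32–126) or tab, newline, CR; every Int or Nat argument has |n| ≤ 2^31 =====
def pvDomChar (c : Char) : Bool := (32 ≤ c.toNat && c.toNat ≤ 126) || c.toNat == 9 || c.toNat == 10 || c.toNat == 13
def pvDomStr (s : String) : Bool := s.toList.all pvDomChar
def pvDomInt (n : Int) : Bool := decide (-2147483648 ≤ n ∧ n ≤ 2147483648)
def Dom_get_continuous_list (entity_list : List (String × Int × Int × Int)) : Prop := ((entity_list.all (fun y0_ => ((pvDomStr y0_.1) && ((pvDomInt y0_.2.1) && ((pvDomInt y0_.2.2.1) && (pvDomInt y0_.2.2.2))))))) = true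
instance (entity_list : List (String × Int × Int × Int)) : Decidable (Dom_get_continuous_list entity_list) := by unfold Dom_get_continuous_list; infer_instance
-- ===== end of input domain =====

-- B replaces A's single stateful merging loop by two staged passes: compute the run-boundary
-- indices first, then slice each (start,end) segment and join its words (alternative decomposition).

-- ===== PORT A =====
def get_continuous_list (entity_list : List (String × Int × Int × Int)) : List String :=
  if entity_list.isEmpty then []
  else
    let d : String × Int × Int × Int := ("", 0, 0, 0)
    let e0 := PySem.List.pyGetD entity_list 0 d
    let st := (PySem.List.pyRange 1 (entity_list.length : Int) 1).foldl
      (fun (acc : List String × String × Int) idx =>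
        let c := PySem.List.pyGetD entity_list idx d
        if c.2.2.1 = acc.2.2 then (acc.1, acc.2.1 ++ c.1, c.2.2.2)
        else (acc.1 ++ [acc.2.1], c.1, c.2.2.2))
      ([], e0.1, e0.2.2.2)
    st.1 ++ [st.2.1]

-- ===== PORT B =====
-- pass 1 of Source B: [i for i, (prev, cur) in enumerate(zip(l, l[1:]), 1) if cur[2] != prev[3]]
def pvBrk (l : List (String × Int × Int × Int)) : List Int :=
  ((PySem.List.enumerate (l.zip l.tail) 1).filter
    (fun q => q.2.2.2.2.1 ≠ q.2.1.2.2.2)).map (·.1)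

-- ''.join(e[0] for e in l[s:t])
def pvSeg (l : List (String × Int × Int × Int)) (st : Int × Int) : String :=
  String.join ((PySem.List.slice l (some st.1) (some st.2)).map (·.1))

-- bounds = [0] + breaks + [n]; result = [join of l[s:t] for (s,t) in zip(bounds, bounds[1:])]
def pvBody (l : List (String × Int × Int × Int)) : List String :=
  let bounds : List Int := 0 :: pvBrk l ++ [(l.length : Int)]
  (bounds.zip (bounds.drop 1)).map (pvSeg l)

def get_continuous_list_alt (entity_list : List (String × Int × Int × Int)) : List String :=
  if entity_list.length = 0 then [] else pvBody entity_list

-- ===== PRECONDITION & SPEC =====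
def Spec_get_continuous_list (entity_list : List (String × Int × Int × Int)) (out : List String) : Prop := out = get_continuous_list_alt entity_list
instance (entity_list : List (String × Int × Int × Int)) (out : List String) : Decidable (Spec_get_continuous_list entity_list out) := by unfold Spec_get_continuous_list; infer_instance

-- ===== CLAIM =====
def Claim_equal_get_continuous_list : Prop := ∀ (entity_list : List (String × Int × Int × Int)), Dom_get_continuous_list entity_list → Spec_get_continuous_list entity_list (get_continuous_list entity_list)

-- ===== LEMMAS AND PROOFS =====

-- A's loop characterised as structural recursion on the remaining entities
def pvRuns (pw : String) (ped : Int) : List (String × Int × Int × Int) → List String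
  | [] => [pw]
  | c :: rs => if c.2.2.1 = ped then pvRuns (pw ++ c.1) c.2.2.2 rs
               else pw :: pvRuns c.1 c.2.2.2 rs

def pvMapHead (f : String → String) : List String → List String
  | [] => []
  | h :: t => f h :: t

theorem join_cons (s : String) (L : List String) :
    String.join (s :: L) = s ++ String.join L := by
  simp [String.join_eq]

-- A's fold equals pvRuns
theorem foldA_runs (rs : List (String × Int × Int × Int)) :
    ∀ (res : List String) (pw : String) (ped : Int),
      (let t := rs.foldl
          (fun (acc : List String × String × Int) (c : String × Int × Int × Int) =>
            if c.2.2.1 = acc.2.2 then (acc.1, acc.2.1 ++ c.1, c.2.2.2)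
            else (acc.1 ++ [acc.2.1], c.1, c.2.2.2)) (res, pw, ped);
        t.1 ++ [t.2.1]) = res ++ pvRuns pw ped rs := by
  induction rs with
  | nil => intro res pw ped; simp [pvRuns]
  | cons c rs ih =>
    intro res pw ped
    simp only [List.foldl_cons]
    by_cases hc : c.2.2.1 = ped
    · rw [pvRuns, if_pos hc]
      simpa [hc] using ih res (pw ++ c.1) c.2.2.2
    · rw [pvRuns, if_neg hc]
      have := ih (res ++ [pw]) c.1 c.2.2.2
      simp only [if_neg hc] at *
      simp [this]

theorem pvRuns_prepend (rs : List (String × Int × Int × Int)) :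
    ∀ (pw a : String) (ped : Int),
      pvRuns (a ++ pw) ped rs = pvMapHead (a ++ ·) (pvRuns pw ped rs) := by
  induction rs with
  | nil => intro pw a ped; simp [pvRuns, pvMapHead]
  | cons c rs ih =>
    intro pw a ped
    by_cases hc : c.2.2.1 = ped
    · rw [pvRuns, if_pos hc, pvRuns, if_pos hc, String.append_assoc, ih]
    · rw [pvRuns, if_neg hc, pvRuns, if_neg hc]; rfl

-- enumerate index shift: starting one later adds one to every kept index
theorem brk_shift {α : Type} (zs : List α) (p : α → Bool) :
    ∀ (s : Int),
      ((PySem.List.enumerate zs (s + 1)).filter (fun q => p q.2)).map (·.1)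
        = ((((PySem.List.enumerate zs s).filter (fun q => p q.2)).map (·.1)).map (· + 1)) := by
  induction zs with
  | nil => intro s; simp [PySem.List.enumerate_nil]
  | cons z zs ih =>
    intro s
    rw [PySem.List.enumerate_cons, PySem.List.enumerate_cons]
    by_cases hp : p z
    · simp [hp, ih (s + 1)]
    · simp [hp, ih (s + 1)]

theorem brk_cons (x y : String × Int × Int × Int) (rs : List (String × Int × Int × Int)) :
    pvBrk (x :: y :: rs)
      = (if y.2.2.1 = x.2.2.2 then [] else [(1 : Int)]) ++ (pvBrk (y :: rs)).map (· + 1) := by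
  unfold pvBrk
  have hz : (x :: y :: rs).zip (x :: y :: rs).tail = (x, y) :: ((y :: rs).zip (y :: rs).tail) := by
    simp
  rw [hz, PySem.List.enumerate_cons, List.filter_cons]
  have hsh := brk_shift ((y :: rs).zip (y :: rs).tail)
    (fun z : (String × Int × Int × Int) × (String × Int × Int × Int) =>
      decide (z.2.2.2.1 ≠ z.1.2.2.2)) 1
  by_cases hc : y.2.2.1 = x.2.2.2
  · simp at hsh; simp [hc, hsh]
  · simp at hsh; simp [hc, hsh]

theorem brk_mem_pos (l : List (String × Int × Int × Int)) :
    ∀ i ∈ pvBrk l, 0 ≤ i := by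
  intro i hi
  unfold pvBrk at hi
  rcases List.mem_map.1 hi with ⟨q, hq, rfl⟩
  have := List.of_mem_filter hq
  have hq' := List.mem_of_mem_filter hq
  rcases (PySem.List.mem_enumerate_iff _ _ _).1 hq' with ⟨k, hk, rfl⟩
  simp; omega

theorem seg_shift (x : String × Int × Int × Int) (l : List (String × Int × Int × Int))
    (s t : Int) (hs : 0 ≤ s) (ht : 0 ≤ t) :
    pvSeg (x :: l) (s + 1, t + 1) = pvSeg l (s, t) := by
  unfold pvSeg
  rw [PySem.List.slice_toNat _ (by omega) (by omega), PySem.List.slice_toNat _ hs ht]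
  have h1 : (s + 1).toNat = s.toNat + 1 := by omega
  have h2 : (t + 1).toNat = t.toNat + 1 := by omega
  rw [h1, h2]
  simp

theorem seg_head (x : String × Int × Int × Int) (l : List (String × Int × Int × Int))
    (b : Int) (hb : 0 ≤ b) :
    pvSeg (x :: l) (0, b + 1) = x.1 ++ pvSeg l (0, b) := by
  unfold pvSeg
  rw [PySem.List.slice_toNat _ (by omega) (by omega), PySem.List.slice_toNat _ le_rfl hb]
  have h2 : (b + 1).toNat = b.toNat + 1 := by omega
  rw [h2]
  simp [join_cons]

theorem seg_single (x : String × Int × Int × Int) (l : List (String × Int × Int × Int)) :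
    pvSeg (x :: l) (0, 1) = x.1 := by
  unfold pvSeg
  rw [PySem.List.slice_toNat _ (by omega) (by omega)]
  simp [String.join]

-- pushing the head through the zipped-bounds map: the no-break shape
theorem seg_map_shift_noB (x : String × Int × Int × Int) (l : List (String × Int × Int × Int))
    (T : List Int) (hT : T ≠ []) (hpos : ∀ i ∈ T, 0 ≤ i) :
    (((0 :: T.map (· + 1)).zip ((0 :: T.map (· + 1)).drop 1)).map (pvSeg (x :: l)))
      = pvMapHead (x.1 ++ ·) (((0 :: T).zip ((0 :: T).drop 1)).map (pvSeg l)) := by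
  cases T with
  | nil => exact absurd rfl hT
  | cons b T' =>
    simp only [List.map_cons, List.drop_one, List.tail_cons, List.zip_cons_cons, List.map_cons,
      pvMapHead]
    refine List.cons_eq_cons.mpr ⟨?_, ?_⟩
    · exact seg_head x l b (hpos b (by simp))
    · have hzm : ((b + 1) :: T'.map (· + 1)).zip (T'.map (· + 1))
          = ((b :: T').zip T').map (fun p => (p.1 + 1, p.2 + 1)) := by
        have : (b + 1) :: T'.map (· + 1) = (b :: T').map (· + 1) := by simp
        rw [this, List.zip_map]
        rfl
      rw [hzm, List.map_map]
      apply List.map_congr_left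
      intro p hp
      have h1 : p.1 ∈ b :: T' := (List.of_mem_zip hp).1
      have h2 : p.2 ∈ T' := (List.of_mem_zip hp).2
      exact seg_shift x l p.1 p.2 (hpos _ h1) (hpos _ (by simp [h2]))

-- the break shape: a fresh segment [0,1) splits off in front
theorem seg_map_shift_brk (x : String × Int × Int × Int) (l : List (String × Int × Int × Int))
    (T : List Int) (hpos : ∀ i ∈ T, 0 ≤ i) :
    (((0 :: 1 :: T.map (· + 1)).zip ((0 :: 1 :: T.map (· + 1)).drop 1)).map (pvSeg (x :: l)))
      = pvSeg (x :: l) (0, 1) :: (((0 :: T).zip ((0 :: T).drop 1)).map (pvSeg l)) := by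
  simp only [List.drop_one, List.tail_cons, List.zip_cons_cons, List.map_cons]
  refine List.cons_eq_cons.mpr ⟨rfl, ?_⟩
  · have hzm : ((1 : Int) :: T.map (· + 1)).zip (T.map (· + 1))
        = ((0 :: T).zip T).map (fun p => (p.1 + 1, p.2 + 1)) := by
      have : (1 : Int) :: T.map (· + 1) = ((0 : Int) :: T).map (· + 1) := by simp
      rw [this, List.zip_map]
      rfl
    rw [hzm, List.map_map]
    apply List.map_congr_left
    intro p hp
    have h1 : p.1 ∈ (0 : Int) :: T := (List.of_mem_zip hp).1
    have h2 : p.2 ∈ T := (List.of_mem_zip hp).2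
    have h1' : 0 ≤ p.1 := by
      rcases List.mem_cons.1 h1 with h | h
      · omega
      · exact hpos _ h
    exact seg_shift x l p.1 p.2 h1' (hpos _ h2)

theorem body_runs (t : List (String × Int × Int × Int)) :
    ∀ x, pvBody (x :: t) = pvRuns x.1 x.2.2.2 t := by
  induction t with
  | nil =>
    intro x
    unfold pvBody pvBrk pvRuns
    simp [PySem.List.enumerate_nil, seg_single x []]
  | cons y rs ih =>
    intro x
    unfold pvBody
    rw [brk_cons]
    have hn : ((x :: y :: rs).length : Int) = ((y :: rs).length : Int) + 1 := by simp
    have hpos : ∀ i ∈ pvBrk (y :: rs) ++ [((y :: rs).length : Int)], 0 ≤ i := by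
      intro i hi
      rcases List.mem_append.1 hi with h | h
      · exact brk_mem_pos _ i h
      · simp at h; omega
    by_cases hc : y.2.2.1 = x.2.2.2
    · -- adjacent: the head word is merged into the first segment
      rw [if_pos hc, List.nil_append]
      have hb : (0 : Int) :: (pvBrk (y :: rs)).map (· + 1) ++ [((x :: y :: rs).length : Int)]
          = 0 :: ((pvBrk (y :: rs)) ++ [((y :: rs).length : Int)]).map (· + 1) := by
        rw [hn]; simp
      rw [hb, seg_map_shift_noB x (y :: rs) _ (by simp) hpos]
      show pvMapHead (x.1 ++ ·) (pvBody (y :: rs)) = _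
      rw [ih y, pvRuns, if_pos hc, ← pvRuns_prepend]
    · -- boundary: the head word is its own segment
      have hb : (0 : Int) :: (1 :: (pvBrk (y :: rs)).map (· + 1)) ++ [((x :: y :: rs).length : Int)]
          = 0 :: 1 :: ((pvBrk (y :: rs)) ++ [((y :: rs).length : Int)]).map (· + 1) := by
        rw [hn]; simp
      rw [if_neg hc, List.singleton_append]
      rw [hb, seg_map_shift_brk x (y :: rs) _ hpos, seg_single]
      show x.1 :: pvBody (y :: rs) = _
      rw [ih y, pvRuns, if_neg hc]

-- ===== VERDICT =====
theorem get_continuous_list_spec : Claim_equal_get_continuous_list := by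
  intro l _
  unfold Spec_get_continuous_list get_continuous_list get_continuous_list_alt
  cases l with
  | nil => simp
  | cons x rs =>
    rw [if_neg (show ¬((x :: rs).isEmpty = true) by simp),
        if_neg (show ¬((x :: rs).length = 0) by simp)]
    have hfold := PySem.List.foldl_pyRange_pyGetD' (x :: rs) ("", 0, 0, 0)
      (fun (acc : List String × String × Int) (c : String × Int × Int × Int) =>
        if c.2.2.1 = acc.2.2 then (acc.1, acc.2.1 ++ c.1, c.2.2.2)
        else (acc.1 ++ [acc.2.1], c.1, c.2.2.2))
      ([], (PySem.List.pyGetD (x :: rs) 0 ("", 0, 0, 0)).1,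
        (PySem.List.pyGetD (x :: rs) 0 ("", 0, 0, 0)).2.2.2) (a := 1) (by omega)
    simp only [PySem.List.pyGetD_zero_cons] at hfold ⊢
    rw [hfold]
    simp only [Int.toNat_one, List.drop_one, List.tail_cons]
    rw [body_runs rs x]
    exact foldA_runs rs [] x.1 x.2.2.2
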